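-- pv_equiv track=rewrite | github.com/qqweqwqweqwe/todoapp | 프로그래머스/단계2/기능개발.py | solution
-- ===== SOURCE A (Python) =====
-- from math import ceil
-- from typing import Counter
--
-- def solution(progresses, speeds):
--   days=[]
--   answer = []
--   for i in range(len(progresses)):
--     days.append(ceil((100-progresses[i])/speeds[i]))
--   for i in range(len(days)-1):
--     if days[i]>days[i+1]:
--       days[i+1]=days[i]
--   co=Counter(days)
--   for i in co.keys():
--     answer.append(co[i])
--   return answer
-- ===== SOURCE B (Python) =====
-- def solution(progresses, speeds):
--     # exact integer ceiling division; == math.ceil((100-p)/s) for inputs |n| <= 2^31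
--     days = [-((p - 100) // s) for p, s in zip(progresses, speeds)]
--     if not days:
--         return []
--     answer = []
--     leader, count = days[0], 1
--     for d in days[1:]:
--         if d > leader:
--             answer.append(count)
--             leader, count = d, 1
--         else:
--             count += 1
--     answer.append(count)
--     return answer
-- ===== Notes on version B (the rewrite author's own statement) =====
-- stated objective: simpler
-- what changed: B replaces A's in-place running-max propagation pass plus Counter histogram with exact integer ceiling division and one greedy sweep that counts each group against its leader day.
import Mathlib
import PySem

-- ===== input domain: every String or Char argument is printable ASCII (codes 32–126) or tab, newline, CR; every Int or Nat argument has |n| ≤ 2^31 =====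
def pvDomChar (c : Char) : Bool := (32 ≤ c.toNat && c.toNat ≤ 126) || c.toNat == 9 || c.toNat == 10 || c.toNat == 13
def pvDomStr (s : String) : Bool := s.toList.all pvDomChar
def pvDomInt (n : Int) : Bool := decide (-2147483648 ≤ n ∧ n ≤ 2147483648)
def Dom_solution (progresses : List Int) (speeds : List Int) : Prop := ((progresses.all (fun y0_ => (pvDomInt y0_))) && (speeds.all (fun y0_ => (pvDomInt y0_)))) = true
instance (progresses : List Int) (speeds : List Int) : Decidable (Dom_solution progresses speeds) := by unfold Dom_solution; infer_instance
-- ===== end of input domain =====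

-- B replaces A's in-place running-max propagation + Counter histogram with exact integer
-- ceiling division and a single greedy sweep counting each group against its leader day.

-- ===== PORT A =====
-- math.ceil((100-p)/s) ported as exact integer ceiling division -((-(100-p)) // s);
-- this equals Python's float computation for all |values| ≤ 2^31 (the Dom bound).
def aCeil (p : Int) (s : Int) : Int := -(PySem.Int.floordiv (-(100 - p)) s)

-- body of A's second loop: 'if days[i] > days[i+1]: days[i+1] = days[i]'
def aStep (ds : List Int) (i : Int) : List Int :=
  if PySem.List.pyGetD ds i 0 > PySem.List.pyGetD ds (i + 1) 0 then
    ds.set (i + 1).toNat (PySem.List.pyGetD ds i 0)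
  else ds

def solution (progresses : List Int) (speeds : List Int) : List Int :=
  let days := (PySem.List.pyRange 0 (progresses.length : Int) 1).foldl
    (fun ds i => ds ++ [aCeil (PySem.List.pyGetD progresses i 0) (PySem.List.pyGetD speeds i 0)]) []
  let days2 := (PySem.List.pyRange 0 ((days.length : Int) - 1) 1).foldl aStep days
  let co := PySem.Dict.counter days2
  co.keys.foldl (fun answer k => answer ++ [co.getD k 0]) []

-- ===== PORT B =====
def bCeil (p : Int) (s : Int) : Int := -(PySem.Int.floordiv (p - 100) s)

def solution_alt (progresses : List Int) (speeds : List Int) : List Int :=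
  let days := (progresses.zip speeds).map (fun ps => bCeil ps.1 ps.2)
  match days with
  | [] => []
  | d :: rest =>
    let st := rest.foldl
      (fun (st : List Int × Int × Int) d =>
        if st.2.1 < d then (st.1 ++ [st.2.2], d, 1) else (st.1, st.2.1, st.2.2 + 1))
      ([], d, 1)
    st.1 ++ [st.2.2]

-- ===== PRECONDITION & SPEC =====
-- Pre_ excludes exactly the inputs where the Python raises: IndexError when speeds is
-- shorter than progresses, ZeroDivisionError when a used speed is 0.
def Pre_solution (progresses : List Int) (speeds : List Int) : Prop :=
  progresses.length ≤ speeds.length ∧ ∀ x ∈ speeds.take progresses.length, x ≠ 0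
instance (progresses : List Int) (speeds : List Int) : Decidable (Pre_solution progresses speeds) := by unfold Pre_solution; infer_instance

def pvWitness_solution : List Int × List Int := ([93, 30, 55], [1, 30, 5])

def Spec_solution (progresses : List Int) (speeds : List Int) (out : List Int) : Prop := out = solution_alt progresses speeds
instance (progresses : List Int) (speeds : List Int) (out : List Int) : Decidable (Spec_solution progresses speeds out) := by unfold Spec_solution; infer_instance

-- ===== CLAIM (what is proved, stated in full; the proofs are below) =====
def Claim_equal_solution : Prop := ∀ (progresses : List Int) (speeds : List Int), Dom_solution progresses speeds → Pre_solution progresses speeds → Spec_solution progresses speeds (solution progresses speeds)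

-- ===== LEMMAS AND PROOFS =====

-- running maxima of a list, seeded with m (the values A's propagation pass leaves in place)
def scanMax' (m : Int) : List Int → List Int
  | [] => []
  | d :: ds => max m d :: scanMax' (max m d) ds

-- B's sweep as a structural recursion on (remaining days, leader, count)
def sweepGo : List Int → Int → Int → List Int
  | [], _, c => [c]
  | d :: ds, leader, c => if leader < d then c :: sweepGo ds d 1 else sweepGo ds leader (c + 1)

theorem mem_of_mem_discard {l : List Int} {m a : Int} (h : a ∈ PySem.Set.discard l m) : a ∈ l := by
  simp only [PySem.Set.discard, List.mem_filter] at h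
  exact h.1

theorem ne_of_mem_discard {l : List Int} {m a : Int} (h : a ∈ PySem.Set.discard l m) : a ≠ m := by
  simp only [PySem.Set.discard, List.mem_filter] at h
  simpa using h.2

theorem discard_of_forall_ne (l : List Int) (m : Int) (h : ∀ a ∈ l, a ≠ m) :
    PySem.Set.discard l m = l := by
  simp only [PySem.Set.discard]
  apply List.filter_eq_self.mpr
  intro a ha
  simpa using h a ha

theorem discard_cons_of_ne (l : List Int) {d m : Int} (h : d ≠ m) :
    PySem.Set.discard (d :: l) m = d :: PySem.Set.discard l m := by
  simp only [PySem.Set.discard, List.filter_cons]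
  rw [if_pos (by simpa using h)]

theorem discard_cons_self (l : List Int) (m : Int) :
    PySem.Set.discard (m :: l) m = PySem.Set.discard l m := by
  simp only [PySem.Set.discard, List.filter_cons]
  rw [if_neg (by simp)]

theorem aStep_cons (k : Nat) (x : Int) (t : List Int) :
    aStep (x :: t) ((k : Int) + 1) = x :: aStep t (k : Int) := by
  unfold aStep
  have h1 : ((k : Int) + 1) = ((k + 1 : Nat) : Int) := by push_cast; ring
  have h2 : ((k : Int) + 1 + 1) = ((k + 2 : Nat) : Int) := by push_cast; ring
  rw [h2, h1]
  simp only [PySem.List.pyGetD_natCast, Int.toNat_natCast, List.getD_cons_succ,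
    List.set_cons_succ]
  split <;> rfl

theorem shift_fold (n : Nat) (x : Int) (t : List Int) :
    (List.range n).foldl (fun (ds : List Int) (k : Nat) => aStep ds ((k : Int) + 1)) (x :: t)
      = x :: (List.range n).foldl (fun (ds : List Int) (k : Nat) => aStep ds (k : Int)) t := by
  induction n generalizing t with
  | zero => simp
  | succ m ih =>
      rw [List.range_succ, List.foldl_append, List.foldl_append, ih]
      simp [aStep_cons]

theorem prop_range (n : Nat) (x : Int) (t : List Int) (ht : t.length = n) :
    (List.range n).foldl (fun (ds : List Int) (k : Nat) => aStep ds (k : Int)) (x :: t)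
      = x :: scanMax' x t := by
  induction n generalizing x t with
  | zero => simp_all [List.length_eq_zero_iff, scanMax']
  | succ m ih =>
      cases t with
      | nil => simp at ht
      | cons y rest =>
          have hfirst : aStep (x :: y :: rest) ((0 : Nat) : Int) = x :: max x y :: rest := by
            unfold aStep
            simp only [Nat.cast_zero, zero_add, Int.toNat_one, PySem.List.pyGetD_ofNat',
              List.getD_cons_zero, List.getD_cons_succ, List.set_cons_succ, List.set_cons_zero]
            rcases (by omega : x ≤ y ∨ y < x) with h | h
            · rw [if_neg (by omega), max_eq_right h]
            · rw [if_pos (by omega), max_eq_left h.le]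
          rw [List.range_succ_eq_map]
          simp only [List.foldl_cons, List.foldl_map]
          rw [hfirst]
          have hc : ∀ (ds : List Int) (k : Nat), aStep ds ((Nat.succ k : Nat) : Int)
              = aStep ds ((k : Int) + 1) := by
            intro ds k; norm_cast
          simp only [hc]
          rw [shift_fold, ih (max x y) rest (by simpa using ht)]
          simp [scanMax']

-- A's whole propagation loop computes the running maxima
theorem prop_eq_cons (x : Int) (t : List Int) :
    (PySem.List.pyRange 0 (((x :: t).length : Int) - 1) 1).foldl aStep (x :: t)
      = x :: scanMax' x t := by
  have hlen : (((x :: t).length : Int)) - 1 = ((t.length : Nat) : Int) := by simp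
  rw [hlen, PySem.List.pyRange_zero_natCast, List.foldl_map]
  exact prop_range t.length x t rfl

-- the two day computations agree when speeds is long enough
theorem days_eq (p s : List Int) (h : p.length ≤ s.length) :
    (PySem.List.pyRange 0 (p.length : Int) 1).foldl
      (fun ds i => ds ++ [aCeil (PySem.List.pyGetD p i 0) (PySem.List.pyGetD s i 0)]) []
      = (p.zip s).map (fun ps => bCeil ps.1 ps.2) := by
  rw [PySem.List.foldl_append_singleton_eq_map, PySem.List.pyRange_zero_natCast, List.map_map]
  apply List.ext_getElem
  · simp [List.length_zip]; omega
  · intro i h1 h2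
    have hip : i < p.length := by simpa using h1
    have his : i < s.length := lt_of_lt_of_le hip h
    simp only [List.nil_append, List.getElem_map, List.getElem_range, Function.comp_apply,
      List.getElem_zip]
    rw [PySem.List.pyGetD_natCast, PySem.List.pyGetD_natCast,
        List.getD_eq_getElem _ _ hip, List.getD_eq_getElem _ _ his]
    unfold aCeil bCeil
    congr 2
    ring

theorem scanMax'_ge (m : Int) (ds : List Int) : ∀ y ∈ scanMax' m ds, m ≤ y := by
  induction ds generalizing m with
  | nil => simp [scanMax']
  | cons d ds ih =>
      intro y hy
      simp only [scanMax', List.mem_cons] at hy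
      rcases hy with h | h
      · omega
      · have := ih (max m d) y h; omega

theorem sweep_fold (ds : List Int) (ans : List Int) (m : Int) (c : Int) :
    (let st := ds.foldl
        (fun (st : List Int × Int × Int) d =>
          if st.2.1 < d then (st.1 ++ [st.2.2], d, 1) else (st.1, st.2.1, st.2.2 + 1))
        (ans, m, c)
     st.1 ++ [st.2.2]) = ans ++ sweepGo ds m c := by
  induction ds generalizing ans m c with
  | nil => simp [sweepGo]
  | cons d ds ih =>
      simp only [List.foldl_cons, sweepGo]
      by_cases h : m < d
      · rw [if_pos h, if_pos h, ih]; simp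
      · rw [if_neg h, if_neg h, ih]

-- B's sweep over a group's tail equals A's Counter read off the running maxima
theorem sweep_counter (ds : List Int) (m : Int) (c : Int) :
    sweepGo ds m c =
      (c + (List.count m (scanMax' m ds) : Int)) ::
        (PySem.Set.discard (PySem.Set.ofList (scanMax' m ds)) m).map
          (fun k => ((List.count k (scanMax' m ds)) : Int)) := by
  induction ds generalizing m c with
  | nil => simp [sweepGo, scanMax', PySem.Set.ofList_nil, PySem.Set.discard]
  | cons d ds ih =>
      by_cases hd : m < d
      · -- new group: leader becomes d
        have hmax : max m d = d := max_eq_right hd.le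
        have hge : ∀ y ∈ scanMax' d ds, d ≤ y := scanMax'_ge d ds
        have hm_not : m ∉ scanMax' d ds := fun h => by have := hge m h; omega
        simp only [sweepGo, if_pos hd, scanMax', hmax]
        rw [ih d 1]
        have hcm : List.count m (d :: scanMax' d ds) = 0 := by
          rw [List.count_eq_zero]
          simp only [List.mem_cons, not_or]
          exact ⟨by omega, hm_not⟩
        rw [hcm, PySem.Set.ofList_cons]
        rw [discard_cons_of_ne _ (by omega : d ≠ m)]
        rw [discard_of_forall_ne _ m (fun a ha => by
          have ha1 : a ∈ scanMax' d ds := (PySem.Set.mem_ofList _ _).mp (mem_of_mem_discard ha)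
          have := hge a ha1
          omega)]
        rw [List.map_cons, List.count_cons_self]
        congr 1
        · push_cast; ring
        congr 1
        · push_cast; ring
        · apply List.map_congr_left
          intro k hk
          have hkne : k ≠ d := ne_of_mem_discard hk
          rw [List.count_cons_of_ne hkne.symm]
      · -- same group: leader stays m
        have hmax : max m d = m := max_eq_left (by omega)
        simp only [sweepGo, if_neg hd, scanMax', hmax]
        rw [ih m (c + 1)]
        rw [PySem.Set.ofList_cons, discard_cons_self]
        have hdd : PySem.Set.discard (PySem.Set.discard (PySem.Set.ofList (scanMax' m ds)) m) m
            = PySem.Set.discard (PySem.Set.ofList (scanMax' m ds)) m :=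
          discard_of_forall_ne _ m (fun a ha => ne_of_mem_discard ha)
        rw [hdd, List.count_cons_self]
        congr 1
        · push_cast; ring
        · apply List.map_congr_left
          intro k hk
          have hkne : k ≠ m := ne_of_mem_discard hk
          rw [List.count_cons_of_ne hkne.symm]

-- ===== VERDICT (by name: the statement is the Claim_ definition above) =====
theorem solution_spec : Claim_equal_solution := by
  intro p s _ hpre
  obtain ⟨hlen, _⟩ := hpre
  unfold Spec_solution solution solution_alt
  simp only []
  rw [days_eq p s hlen]
  cases hD : (p.zip s).map (fun ps => bCeil ps.1 ps.2) with
  | nil => rfl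
  | cons d rest =>
      dsimp only
      rw [prop_eq_cons]
      rw [PySem.List.foldl_append_singleton_eq_map, PySem.Dict.keys_counter]
      rw [sweep_fold, List.nil_append]
      rw [sweep_counter]
      rw [PySem.Set.ofList_cons, List.map_cons, PySem.Dict.getD_counter, List.count_cons_self]
      congr 1
      · push_cast; ring
      · apply List.map_congr_left
        intro k hk
        rw [PySem.Dict.getD_counter, List.count_cons_of_ne (ne_of_mem_discard hk).symm]
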